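-- pv_equiv track=rewrite | github.com/achebatarev/AdventOfCode | 2021/04_day/main.py | board_bingo
-- ===== SOURCE A (Python) =====
-- def board_bingo(board, pos):
--     min_score = 3431
--     #pprint(board)
--     for line in board:
--         max_score = 0
--         for e in line:
--             max_score = max(max_score, pos[e])
--         min_score = min(min_score, max_score)
--     for x in range(len(board)):
--         max_score = 0
--         for y in range(len(board)):
--             max_score = max(max_score, pos[board[y][x]])
--         min_score = min(min_score, max_score)
--
--     return min_score
-- ===== SOURCE B (Python) =====
-- def board_bingo(board, pos):
--     # Single fused pass over the cells: while scanning each row once we update both the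
--     # running row maximum and a per-column maximum accumulator, instead of A's two staged
--     # loops (one over rows, one re-reading every cell via board[y][x] column indexing).
--     n = len(board)
--     best = 3431
--     col_max = [0] * n
--     for row in board:
--         m = 0
--         for j, v in enumerate(row):
--             s = pos[v]
--             if s > m:
--                 m = s
--             if j < n and s > col_max[j]:
--                 col_max[j] = s
--         if m < best:
--             best = m
--     for c in col_max:
--         if c < best:
--             best = c
--     return best
-- ===== Notes on version B (the rewrite author's own statement) =====
-- stated objective: alternative
-- what changed: A makes two staged scans (per-row maxima, then a second full pass re-reading every cell by board[y][x] column indexing); B makes ONE fused pass over the cells, maintaining the running row maximum and a per-column maximum accumulator array simultaneously, then takes the min over the accumulated maxima.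
import Mathlib
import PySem

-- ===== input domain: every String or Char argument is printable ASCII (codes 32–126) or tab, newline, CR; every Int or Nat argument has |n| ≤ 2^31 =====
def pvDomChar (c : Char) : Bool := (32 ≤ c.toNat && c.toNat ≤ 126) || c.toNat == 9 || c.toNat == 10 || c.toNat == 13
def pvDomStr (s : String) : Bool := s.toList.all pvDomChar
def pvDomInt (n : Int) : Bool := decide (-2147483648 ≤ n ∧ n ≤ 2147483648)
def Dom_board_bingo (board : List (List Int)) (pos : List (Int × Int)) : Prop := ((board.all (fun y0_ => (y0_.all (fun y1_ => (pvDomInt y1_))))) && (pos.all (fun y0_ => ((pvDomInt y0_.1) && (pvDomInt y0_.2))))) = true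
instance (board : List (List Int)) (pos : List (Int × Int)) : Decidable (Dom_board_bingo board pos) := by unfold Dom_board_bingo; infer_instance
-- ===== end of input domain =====

-- B replaces A's two staged scans (per-row maxima, then a column re-scan via board[y][x])
-- by ONE fused pass over the cells that maintains the running row maximum and a per-column
-- maximum accumulator simultaneously (objective: alternative — each cell is read once).


-- ===== PORT A =====
-- pos[e] is PySem.Dict lookup; .getD 0 is the total form, exact under Pre_ (key present);
-- board[y][x] is pyGetD, exact under Pre_ (y < len(board) by the range, x < len(row)).
def board_bingo (board : List (List Int)) (pos : List (Int × Int)) : Int :=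
  let f : Int → Int := fun e => ((PySem.Dict.mk pos).get? e).getD 0
  let s1 : Int := board.foldl (fun mn line =>
      min mn (line.foldl (fun mx e => max mx (f e)) 0)) 3431
  (PySem.List.pyRange 0 board.length 1).foldl (fun mn x =>
    min mn ((PySem.List.pyRange 0 board.length 1).foldl (fun mx y =>
      max mx (f (PySem.List.pyGetD (PySem.List.pyGetD board y []) x 0))) 0)) s1

-- ===== PORT B =====
-- body of B's inner loop 'for j, v in enumerate(row)': update running row max m and
-- col_max[j]; the enumerate index je.1 is ≥ 0, so .toNat is exact; the guarded
-- 'col_max[j] = s' item assignment is ported as List.set (exact: 0 ≤ j < n = length)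
def bbStep (f : Int → Int) (n : Nat) (mc : Int × List Int) (je : Int × Int) : Int × List Int :=
  let s := f je.2
  let m := if mc.1 < s then s else mc.1
  let cm := if je.1 < (n : Int) ∧ mc.2.getD je.1.toNat 0 < s then mc.2.set je.1.toNat s else mc.2
  (m, cm)

-- body of B's outer loop 'for row in board': run the inner loop from (0, col_max),
-- then 'if m < best: best = m'
def bbRow (f : Int → Int) (n : Nat) (bc : Int × List Int) (row : List Int) : Int × List Int :=
  let inner := (PySem.List.enumerate row).foldl (bbStep f n) (0, bc.2)
  (if inner.1 < bc.1 then inner.1 else bc.1, inner.2)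

def board_bingo_alt (board : List (List Int)) (pos : List (Int × Int)) : Int :=
  let f : Int → Int := fun e => ((PySem.Dict.mk pos).get? e).getD 0
  let n : Nat := board.length
  let r := board.foldl (bbRow f n) (3431, List.replicate n 0)
  r.2.foldl (fun best c => if c < best then c else best) r.1

-- ===== PRECONDITION & SPEC =====
-- Pre_ excludes exactly the inputs where Python A raises: KeyError when some board entry
-- is not a key of pos, IndexError when some row is shorter than len(board) (column loop).
def Pre_board_bingo (board : List (List Int)) (pos : List (Int × Int)) : Prop :=
  (∀ row ∈ board, board.length ≤ row.length) ∧
  (∀ row ∈ board, ∀ e ∈ row, e ∈ pos.map Prod.fst)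
instance (board : List (List Int)) (pos : List (Int × Int)) : Decidable (Pre_board_bingo board pos) := by unfold Pre_board_bingo; infer_instance

def pvWitness_board_bingo : List (List Int) × (List (Int × Int)) :=
  ([[3, 1], [2, 0]], [(0, 4), (1, 7), (2, 5), (3, 6)])

def Spec_board_bingo (board : List (List Int)) (pos : List (Int × Int)) (out : Int) : Prop := out = board_bingo_alt board pos
instance (board : List (List Int)) (pos : List (Int × Int)) (out : Int) : Decidable (Spec_board_bingo board pos out) := by unfold Spec_board_bingo; infer_instance

-- ===== CLAIM (what is proved, stated in full; the proofs are below) =====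
def Claim_equal_board_bingo : Prop := ∀ (board : List (List Int)) (pos : List (Int × Int)), Dom_board_bingo board pos → Pre_board_bingo board pos → Spec_board_bingo board pos (board_bingo board pos)

-- ===== LEMMAS AND PROOFS =====

lemma if_lt_eq_max (a b : Int) : (if a < b then b else a) = max a b := by
  rcases lt_or_ge a b with h | h
  · rw [if_pos h, max_eq_right h.le]
  · rw [if_neg (not_lt.mpr h), max_eq_left h]

lemma if_lt_eq_min (a b : Int) : (if b < a then b else a) = min a b := by
  rcases lt_or_ge b a with h | h
  · rw [if_pos h, min_eq_right h.le]
  · rw [if_neg (not_lt.mpr h), min_eq_left h]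

-- B's inner loop over one row: first component is the running max of f over the row,
-- second component keeps length n and updates col_max at the indices the row covers
lemma bbInner (f : Int → Int) (n : Nat) (row : List Int) :
    ∀ (k : Nat) (m0 : Int) (cm : List Int), cm.length = n →
      ((PySem.List.enumerate row (k : Int)).foldl (bbStep f n) (m0, cm)).1
          = (row.map f).foldl max m0
      ∧ ((PySem.List.enumerate row (k : Int)).foldl (bbStep f n) (m0, cm)).2.length = n
      ∧ ∀ j : Nat, j < n →
          ((PySem.List.enumerate row (k : Int)).foldl (bbStep f n) (m0, cm)).2.getD j 0
            = if k ≤ j ∧ j < k + row.length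
              then max (cm.getD j 0) (f (row.getD (j - k) 0)) else cm.getD j 0 := by
  induction row with
  | nil =>
      intro k m0 cm hcm
      refine ⟨rfl, hcm, ?_⟩
      intro j hj
      rw [if_neg (by simp), PySem.List.enumerate_nil]
      rfl
  | cons e t ih =>
      intro k m0 cm hcm
      rw [PySem.List.enumerate_cons]
      have hstep : bbStep f n (m0, cm) ((k : Int), e)
          = (max m0 (f e),
             if (k : Int) < (n : Int) ∧ cm.getD k 0 < f e then cm.set k (f e) else cm) := by
        simp [bbStep, if_lt_eq_max]
      have hcm1 : (if (k : Int) < (n : Int) ∧ cm.getD k 0 < f e then cm.set k (f e) else cm).length = n := by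
        split_ifs <;> simp [hcm]
      have hcast : (k : Int) + 1 = ((k + 1 : Nat) : Int) := by push_cast; ring
      rw [List.foldl_cons, hstep, hcast]
      obtain ⟨ih1, ih2, ih3⟩ := ih (k + 1)
        (max m0 (f e))
        (if (k : Int) < (n : Int) ∧ cm.getD k 0 < f e then cm.set k (f e) else cm) hcm1
      refine ⟨by rw [ih1]; simp, ih2, ?_⟩
      intro j hj
      -- value of the once-updated accumulator at j
      have hval : (if (k : Int) < (n : Int) ∧ cm.getD k 0 < f e then cm.set k (f e) else cm).getD j 0
          = if j = k then max (cm.getD k 0) (f e) else cm.getD j 0 := by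
        by_cases hjk : j = k
        · subst hjk
          have hkn : (j : Int) < (n : Int) := by exact_mod_cast hj
          by_cases hlt : cm.getD j 0 < f e
          · rw [if_pos ⟨hkn, hlt⟩, if_pos rfl,
                List.getD_eq_getElem _ _ (by rw [List.length_set, hcm]; exact hj),
                List.getElem_set_self]
            exact (max_eq_right hlt.le).symm
          · rw [if_neg (by tauto), if_pos rfl, max_eq_left (not_lt.mp hlt)]
        · split_ifs with hg
          · rw [List.getD_eq_getElem _ _ (by rw [List.length_set, hcm]; exact hj),
                List.getElem_set_ne (by omega),
                ← List.getD_eq_getElem _ _ (by rw [hcm]; exact hj)]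
          · rfl
      rw [ih3 j hj, hval]
      by_cases hjk : j = k
      · subst hjk
        rw [if_pos rfl, if_neg (by omega), if_pos (show j ≤ j ∧ j < j + (e :: t).length by simp)]
        simp
      · rw [if_neg hjk]
        by_cases hin : k + 1 ≤ j ∧ j < k + 1 + t.length
        · rw [if_pos hin, if_pos (show k ≤ j ∧ j < k + (e :: t).length by simp; omega)]
          have hsub : j - k = (j - (k + 1)) + 1 := by omega
          rw [hsub, List.getD_cons_succ]
        · rw [if_neg hin, if_neg (show ¬ (k ≤ j ∧ j < k + (e :: t).length) by simp; omega)]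

-- B's outer loop over the rows of the board (length hypothesis from Pre_: every row
-- covers all n column indices)
lemma bbRows (f : Int → Int) (n : Nat) :
    ∀ (bs : List (List Int)) (best : Int) (cm : List Int), cm.length = n →
      (∀ row ∈ bs, n ≤ row.length) →
      (bs.foldl (bbRow f n) (best, cm)).1
          = (bs.map (fun line => (line.map f).foldl max 0)).foldl min best
      ∧ (bs.foldl (bbRow f n) (best, cm)).2.length = n
      ∧ ∀ j : Nat, j < n →
          (bs.foldl (bbRow f n) (best, cm)).2.getD j 0
            = bs.foldl (fun acc row => max acc (f (row.getD j 0))) (cm.getD j 0) := by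
  intro bs
  induction bs with
  | nil => intro best cm hcm _; exact ⟨rfl, hcm, fun _ _ => rfl⟩
  | cons row t ih =>
      intro best cm hcm hlen
      obtain ⟨i1, i2, i3⟩ := bbInner f n row 0 0 cm hcm
      simp only [Nat.cast_zero] at i1 i2 i3
      have hrow : bbRow f n (best, cm) row
          = (min best ((row.map f).foldl max 0),
             ((PySem.List.enumerate row 0).foldl (bbStep f n) (0, cm)).2) := by
        unfold bbRow
        simp only [i1, if_lt_eq_min]
      rw [List.foldl_cons, hrow]
      obtain ⟨j1, j2, j3⟩ := ih (min best ((row.map f).foldl max 0))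
        ((PySem.List.enumerate row 0).foldl (bbStep f n) (0, cm)).2 i2
        (fun r hr => hlen r (List.mem_cons_of_mem _ hr))
      refine ⟨by rw [j1]; simp, j2, ?_⟩
      intro j hj
      rw [j3 j hj, i3 j hj,
          if_pos ⟨Nat.zero_le _, by have := hlen row List.mem_cons_self; omega⟩]
      simp

-- A's inner column loop over y equals the fold of max over the rows' j-th entries
lemma colA_eq (board : List (List Int)) (f : Int → Int) (x : Nat) :
    (List.map (fun k : Nat => ((k : Int))) (List.range board.length)).foldl (fun mx y =>
        max mx (f (PySem.List.pyGetD (PySem.List.pyGetD board y []) (x : Int) 0))) 0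
      = board.foldl (fun acc row => max acc (f (row.getD x 0))) 0 := by
  rw [← PySem.List.pyRange_zero_natCast board.length]
  rw [PySem.List.foldl_pyRange_zero_pyGetD' board ([] : List Int)
      (fun mx row => max mx (f (PySem.List.pyGetD row (x : Int) 0))) 0]
  simp [PySem.List.pyGetD_natCast]

theorem board_bingo_spec : Claim_equal_board_bingo := by
  intro board pos _ hpre
  unfold Spec_board_bingo board_bingo board_bingo_alt
  simp only []
  set f : Int → Int := fun e => ((PySem.Dict.mk pos).get? e).getD 0
  set n : Nat := board.length with hn
  obtain ⟨r1, r2, r3⟩ := bbRows f n board 3431 (List.replicate n 0) (by simp) hpre.1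
  -- B's final column accumulator equals the list of column scores
  have hcols : (board.foldl (bbRow f n) (3431, List.replicate n 0)).2
      = (List.range n).map (fun j => board.foldl (fun acc row => max acc (f (row.getD j 0))) 0) := by
    apply List.ext_getElem
    · simp [r2]
    · intro j hj hj'
      have hjn : j < n := by simpa [r2] using hj
      rw [← List.getD_eq_getElem _ 0 hj, r3 j hjn]
      simp
  -- B's trailing 'for c in col_max' loop is a fold of min
  have hBfinal : ∀ (cs : List Int) (b : Int),
      cs.foldl (fun best c => if c < best then c else best) b = cs.foldl min b := by
    intro cs
    induction cs with
    | nil => intro b; rfl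
    | cons c t ihc => intro b; rw [List.foldl_cons, List.foldl_cons, if_lt_eq_min, ihc]
  -- put B into canonical shape
  rw [hBfinal, hcols, r1, List.foldl_map]
  -- put A into the same shape
  have hrows : board.foldl (fun mn line => min mn (line.foldl (fun mx e => max mx (f e)) 0)) (3431 : Int)
      = (board.map (fun line => (line.map f).foldl max 0)).foldl min 3431 := by
    simp [List.foldl_map]
  rw [PySem.List.pyRange_zero_natCast board.length, hrows, ← hn, List.foldl_map]
  congr 1
  funext mn x
  congr 1
  exact colA_eq board f x
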